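-- pv_equiv track=rewrite | github.com/muneebaifrah/Unstop-100-Days-Coding-Sprint | Day-55/4.Counting_Problem.py | count_unique_numbers
-- ===== SOURCE A (Python) =====
-- import heapq
-- from collections import Counter
--
-- def count_unique_numbers(arr):
--     """
--     Determines the count of unique numbers based on the given conditions.
--
--     Parameters:
--         arr (list): List of integers
--
--     Returns:
--         int: Count of unique numbers based on the problem statement
--     """
--     if not arr:
--         return 0
--
--     # Step 1: Count frequencies
--     freq = Counter(arr)
--
--     # Step 2: Use a max-heap (Python heapq is min-heap, so use negative values)
--     max_heap = [-num for num in freq.keys()]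
--     heapq.heapify(max_heap)
--
--     unique_count = 0  # Count of unique numbers
--
--     while max_heap:
--         num = -heapq.heappop(max_heap)  # Get the largest number
--
--         if freq[num] == 1:  # Unique number
--             unique_count += 1
--             del freq[num]  # Remove from frequency map
--
--             # Insert half of num if it's greater than zero
--             half_num = num // 2
--             if half_num > 0:
--                 if half_num in freq:
--                     freq[half_num] += 1
--                 else:
--                     freq[half_num] = 1
--                     heapq.heappush(max_heap, -half_num)  # Insert in heap
--
--         else:  # Non-unique, remove all occurrences
--             del freq[num]
--
--     return unique_count
-- ===== SOURCE B (Python) =====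
-- from collections import Counter
--
-- def count_unique_numbers(arr):
--     # Same counting process, but no heap: the Counter itself is the selection
--     # pool; each round handles the current largest distinct value.
--     freq = Counter(arr)
--     unique_count = 0
--     while freq:
--         num = max(freq)
--         if freq[num] == 1:
--             unique_count += 1
--             del freq[num]
--             half = num // 2
--             if half > 0:
--                 freq[half] = freq.get(half, 0) + 1
--         else:
--             del freq[num]
--     return unique_count
-- ===== Notes on version B (the rewrite author's own statement) =====
-- stated objective: simpler
-- what changed: Drops heapq entirely: the Counter dict itself is the selection pool and each round takes max(freq) directly, since injected halves are always smaller than the current maximum.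
import Mathlib
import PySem

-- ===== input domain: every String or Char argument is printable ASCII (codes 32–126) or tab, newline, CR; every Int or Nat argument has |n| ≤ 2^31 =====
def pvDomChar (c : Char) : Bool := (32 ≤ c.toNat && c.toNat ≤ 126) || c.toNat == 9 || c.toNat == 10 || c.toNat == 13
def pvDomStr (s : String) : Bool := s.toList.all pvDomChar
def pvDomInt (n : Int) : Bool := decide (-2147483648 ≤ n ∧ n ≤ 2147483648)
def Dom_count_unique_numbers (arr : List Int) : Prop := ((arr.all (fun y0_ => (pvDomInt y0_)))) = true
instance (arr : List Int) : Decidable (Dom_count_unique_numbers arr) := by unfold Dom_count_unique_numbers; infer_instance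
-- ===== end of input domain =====

-- B drops the heap and selects max(freq) from the Counter directly each round; objective: simpler.

-- ===== PORT A =====
-- Python's heapq primitives, transliterated (list min-heap; _siftdown / _siftup / heapify / heappush / heappop).

-- inner while-loop of heapq._siftdown (newitem held out, returns array and final hole position)
def pySiftdownLoop (heap : List Int) (startpos pos : Nat) (newitem : Int) : List Int × Nat :=
  if startpos < pos then
    let parentpos := (pos - 1) / 2
    let parent := heap.getD parentpos 0
    if newitem < parent then
      pySiftdownLoop (heap.set pos parent) startpos parentpos newitem
    else (heap, pos)
  else (heap, pos)
  termination_by pos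
  decreasing_by have := Nat.div_le_self (pos - 1) 2; omega

-- heapq._siftdown(heap, startpos, pos)
def pySiftdown (heap : List Int) (startpos pos : Nat) : List Int :=
  let newitem := heap.getD pos 0
  let r := pySiftdownLoop heap startpos pos newitem
  r.1.set r.2 newitem

-- inner while-loop of heapq._siftup (hole percolates down along the smaller child)
def pySiftupLoop (heap : List Int) (pos endpos : Nat) : List Int × Nat :=
  if 2 * pos + 1 < endpos then
    let childpos :=
      if 2 * pos + 2 < endpos ∧ ¬ (heap.getD (2 * pos + 1) 0 < heap.getD (2 * pos + 2) 0)
      then 2 * pos + 2 else 2 * pos + 1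
    pySiftupLoop (heap.set pos (heap.getD childpos 0)) childpos endpos
  else (heap, pos)
  termination_by endpos - pos
  decreasing_by split <;> omega

-- heapq._siftup(heap, pos): percolate the hole to a leaf, write newitem there, then _siftdown back up
def pySiftup (heap : List Int) (pos : Nat) : List Int :=
  let endpos := heap.length
  let newitem := heap.getD pos 0
  let r := pySiftupLoop heap pos endpos
  pySiftdown (r.1.set r.2 newitem) pos r.2

-- heapq.heapify: for i in reversed(range(n//2)): _siftup(x, i)
def pyHeapify (x : List Int) : List Int :=
  (List.range (x.length / 2)).reverse.foldl (fun h i => pySiftup h i) x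

-- heapq.heappush
def pyHeappush (heap : List Int) (item : Int) : List Int :=
  pySiftdown (heap ++ [item]) 0 heap.length

-- heapq.heappop (Python raises IndexError on []; in A it is only called on a nonempty heap)
def pyHeappop (heap : List Int) : Int × List Int :=
  let lastelt := heap.getLast?.getD 0
  let rest := heap.dropLast
  if rest.isEmpty then (lastelt, rest)
  else (rest.getD 0 0, pySiftup (rest.set 0 lastelt) 0)

-- fuel bound for the while-loop: each initial distinct key |k| ≤ 2^31 generates at most 33 pops
def pvFuel (arr : List Int) : Nat := 33 * arr.length + 1

-- the while max_heap: loop of A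
def loopA (fuel : Nat) (heap : List Int) (freq : PySem.Dict Int Int) (cnt : Int) : Int :=
  match fuel with
  | 0 => cnt
  | fuel + 1 =>
    if heap.isEmpty then cnt
    else
      let p := pyHeappop heap
      let num := -p.1
      if freq.getD num 0 = 1 then
        let freq1 := freq.erase num          -- del freq[num] (num is always present here)
        let half := PySem.Int.floordiv num 2
        if 0 < half then
          if freq1.contains half then
            loopA fuel p.2 (freq1.insert half (freq1.getD half 0 + 1)) (cnt + 1)
          else
            loopA fuel (pyHeappush p.2 (-half)) (freq1.insert half 1) (cnt + 1)
        else loopA fuel p.2 freq1 (cnt + 1)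
      else loopA fuel p.2 (freq.erase num) cnt

def count_unique_numbers (arr : List Int) : Int :=
  if arr.isEmpty then 0
  else
    let freq := PySem.Dict.counter arr
    let heap := pyHeapify (freq.keys.map (fun k => -k))
    loopA (pvFuel arr) heap freq 0

-- ===== PORT B =====
-- the while freq: loop of B (max(freq) selects the largest distinct key directly)
def loopB (fuel : Nat) (freq : PySem.Dict Int Int) (cnt : Int) : Int :=
  match fuel with
  | 0 => cnt
  | fuel + 1 =>
    match PySem.List.max? freq.keys (fun k => k) with
    | none => cnt
    | some num =>
      if freq.getD num 0 = 1 then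
        let freq1 := freq.erase num
        let half := PySem.Int.floordiv num 2
        if 0 < half then loopB fuel (freq1.insert half (freq1.getD half 0 + 1)) (cnt + 1)
        else loopB fuel freq1 (cnt + 1)
      else loopB fuel (freq.erase num) cnt

def count_unique_numbers_alt (arr : List Int) : Int :=
  loopB (pvFuel arr) (PySem.Dict.counter arr) 0

-- ===== PRECONDITION & SPEC =====
def Spec_count_unique_numbers (arr : List Int) (out : Int) : Prop := out = count_unique_numbers_alt arr
instance (arr : List Int) (out : Int) : Decidable (Spec_count_unique_numbers arr out) := by unfold Spec_count_unique_numbers; infer_instance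

-- ===== CLAIM (what is proved, stated in full; the proofs are below) =====
def Claim_equal_count_unique_numbers : Prop := ∀ (arr : List Int), Dom_count_unique_numbers arr → Spec_count_unique_numbers arr (count_unique_numbers arr)

-- ===== LEMMAS AND PROOFS =====

theorem pvGetD_set (h : List Int) (i j : Nat) (v : Int) :
    (h.set i v).getD j 0 = if i = j ∧ i < h.length then v else h.getD j 0 := by
  simp only [List.getD_eq_getElem?_getD, List.getElem?_set]
  split_ifs with h1 h2 h3 <;> simp_all <;> omega

theorem pvSet_getD_self (h : List Int) (i : Nat) (hi : i < h.length) :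
    h.set i (h.getD i 0) = h := by
  rw [List.getD_eq_getElem h 0 hi, List.set_getElem_self]

theorem pvCount_set (h : List Int) (i : Nat) (v y : Int) (hi : i < h.length) :
    (h.set i v).count y + (if h.getD i 0 = y then 1 else 0)
      = h.count y + (if v = y then 1 else 0) := by
  induction h generalizing i with
  | nil => simp at hi
  | cons a t ih =>
    cases i with
    | zero => simp [List.count_cons]; split_ifs <;> omega
    | succ n =>
      simp only [List.set_cons_succ, List.count_cons, List.getD_cons_succ]
      have := ih n (by simpa using hi)
      split_ifs at this ⊢ <;> omega

theorem pvSet_swap_perm (h : List Int) (p q : Nat) (hp : p < h.length) (hq : q < h.length) :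
    ((h.set p (h.getD q 0)).set q (h.getD p 0)).Perm h := by
  by_cases hpq : p = q
  · subst hpq
    rw [pvSet_getD_self h p hp, pvSet_getD_self h p hp]
  · rw [List.perm_iff_count]; intro y
    have h1 := pvCount_set (h.set p (h.getD q 0)) q (h.getD p 0) y (by simpa using hq)
    have h2 := pvCount_set h p (h.getD q 0) y hp
    have h3 : (h.set p (h.getD q 0)).getD q 0 = h.getD q 0 := by
      rw [pvGetD_set]; simp [hpq]
    rw [h3] at h1
    split_ifs at h1 h2 <;> omega

-- subtree membership: j lies in the subtree rooted at i (parent of j is (j-1)/2)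
def inSub (i j : Nat) : Bool :=
  if j ≤ i then j == i
  else inSub i ((j - 1) / 2)
  termination_by j
  decreasing_by have := Nat.div_le_self (j - 1) 2; omega

theorem inSub_self (i : Nat) : inSub i i = true := by
  unfold inSub; simp

theorem inSub_zero (j : Nat) : inSub 0 j = true := by
  induction j using Nat.strong_induction_on with
  | _ j ih =>
    unfold inSub
    split
    · simp; omega
    · exact ih ((j - 1) / 2) (by have := Nat.div_le_self (j - 1) 2; omega)

theorem le_of_inSub {i j : Nat} (h : inSub i j = true) : i ≤ j := by
  unfold inSub at h
  by_cases hji : j ≤ i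
  · simp [hji] at h; omega
  · omega

theorem inSub_parent {i j : Nat} (h : inSub i j = true) (hne : j ≠ i) :
    inSub i ((j - 1) / 2) = true := by
  unfold inSub at h
  split at h
  · simp at h; omega
  · exact h

theorem inSub_of_parent {i j : Nat} (h : inSub i ((j - 1) / 2) = true) (hij : i < j) :
    inSub i j = true := by
  unfold inSub
  split
  · omega
  · exact h

-- heap-order pair: parent value ≤ child value (at child index c)
def POK (h : List Int) (c : Nat) : Prop := h.getD ((c - 1) / 2) 0 ≤ h.getD c 0

def IsHeap (h : List Int) : Prop := ∀ c, 0 < c → c < h.length → POK h c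

theorem pvRoot_min {h : List Int} (hh : IsHeap h) :
    ∀ j, j < h.length → h.getD 0 0 ≤ h.getD j 0 := by
  intro j
  induction j using Nat.strong_induction_on with
  | _ j ih =>
    intro hj
    rcases Nat.eq_zero_or_pos j with hj0 | hj0
    · subst hj0; exact le_refl _
    · have hp : (j - 1) / 2 < j := by have := Nat.div_le_self (j - 1) 2; omega
      exact le_trans (ih _ hp (lt_trans hp hj)) (hh j hj0 hj)

theorem pvGetD_set_self (h : List Int) (i : Nat) (v : Int) (hi : i < h.length) :
    (h.set i v).getD i 0 = v := by
  rw [pvGetD_set, if_pos ⟨rfl, hi⟩]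

theorem pvGetD_set_ne (h : List Int) (i j : Nat) (v : Int) (hne : i ≠ j) :
    (h.set i v).getD j 0 = h.getD j 0 := by
  rw [pvGetD_set, if_neg]; rintro ⟨h1, -⟩; exact hne h1

theorem siftdownLoop_spec (h : List Int) (s pos : Nat) (x : Int)
    (hs : s ≤ pos) (hlen : pos < h.length) (hin : inSub s pos = true)
    (hpairs : ∀ c, 0 < c → c < h.length → inSub s c = true → c ≠ s → c ≠ pos → POK (h.set pos x) c)
    (hgp : pos ≠ s → ∀ c, c < h.length → (c - 1) / 2 = pos →
        (h.set pos x).getD ((pos - 1) / 2) 0 ≤ (h.set pos x).getD c 0) :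
    ((pySiftdownLoop h s pos x).1.set (pySiftdownLoop h s pos x).2 x).Perm (h.set pos x) ∧
    (pySiftdownLoop h s pos x).1.length = h.length ∧
    inSub s (pySiftdownLoop h s pos x).2 = true ∧
    (pySiftdownLoop h s pos x).2 < h.length ∧
    (∀ j, inSub s j = false → ((pySiftdownLoop h s pos x).1.set (pySiftdownLoop h s pos x).2 x).getD j 0 = h.getD j 0) ∧
    (∀ c, 0 < c → c < h.length → inSub s c = true → c ≠ s →
        POK ((pySiftdownLoop h s pos x).1.set (pySiftdownLoop h s pos x).2 x) c) := by
  induction pos using Nat.strong_induction_on generalizing h with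
  | _ pos ih =>
  have hgx : (h.set pos x).getD pos 0 = x := pvGetD_set_self h pos x hlen
  have hgother : ∀ j, j ≠ pos → (h.set pos x).getD j 0 = h.getD j 0 := by
    intro j hj; exact pvGetD_set_ne h pos j x (fun hc => hj hc.symm)
  by_cases hsp : s < pos
  case neg =>
    have hps : pos = s := by omega
    rw [pySiftdownLoop, if_neg hsp]
    refine ⟨List.Perm.refl _, by simp, hin, hlen, ?_, ?_⟩
    · intro j hj
      apply hgother
      intro hc; subst hc; rw [hin] at hj; cases hj
    · intro c hc0 hcl hcs hcns
      exact hpairs c hc0 hcl hcs hcns (by omega)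
  case pos =>
  have hpplt : (pos - 1) / 2 < pos := by have := Nat.div_le_self (pos - 1) 2; omega
  have hpplen : (pos - 1) / 2 < h.length := lt_trans hpplt hlen
  have hinpp : inSub s ((pos - 1) / 2) = true := inSub_parent hin (by omega)
  have hspp : s ≤ (pos - 1) / 2 := le_of_inSub hinpp
  have hgpp : (h.set pos x).getD ((pos - 1) / 2) 0 = h.getD ((pos - 1) / 2) 0 :=
    hgother _ (by omega)
  by_cases hlt : x < h.getD ((pos - 1) / 2) 0
  case neg =>
    rw [pySiftdownLoop, if_pos hsp]
    simp only [if_neg hlt]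
    refine ⟨List.Perm.refl _, by simp, hin, hlen, ?_, ?_⟩
    · intro j hj
      apply hgother
      intro hc; subst hc; rw [hin] at hj; cases hj
    · intro c hc0 hcl hcs hcns
      by_cases hcp : c = pos
      · subst hcp
        unfold POK
        rw [hgx, hgpp]; omega
      · exact hpairs c hc0 hcl hcs hcns hcp
  case pos =>
  have hunf : pySiftdownLoop h s pos x
      = pySiftdownLoop (h.set pos (h.getD ((pos - 1) / 2) 0)) s ((pos - 1) / 2) x := by
    rw [pySiftdownLoop]
    simp only [if_pos hsp, if_pos hlt]
  -- getD facts about the new hole array g' = (h.set pos parent).set pp x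
  have hlen' : (h.set pos (h.getD ((pos - 1) / 2) 0)).length = h.length := by simp
  have hgd_pp : ((h.set pos (h.getD ((pos - 1) / 2) 0)).set ((pos - 1) / 2) x).getD ((pos - 1) / 2) 0 = x :=
    pvGetD_set_self _ _ _ (by rw [hlen']; exact hpplen)
  have hgd_pos : ((h.set pos (h.getD ((pos - 1) / 2) 0)).set ((pos - 1) / 2) x).getD pos 0
      = h.getD ((pos - 1) / 2) 0 := by
    rw [pvGetD_set_ne _ _ _ _ (by omega), pvGetD_set_self _ _ _ hlen]
  have hgd_other : ∀ j, j ≠ (pos - 1) / 2 → j ≠ pos →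
      ((h.set pos (h.getD ((pos - 1) / 2) 0)).set ((pos - 1) / 2) x).getD j 0 = h.getD j 0 := by
    intro j h1 h2
    rw [pvGetD_set_ne _ _ _ _ (fun hc => h1 hc.symm), pvGetD_set_ne _ _ _ _ (fun hc => h2 hc.symm)]
  have harg := ih ((pos - 1) / 2) hpplt (h.set pos (h.getD ((pos - 1) / 2) 0)) hspp
      (by rw [hlen']; exact hpplen) hinpp ?_ ?_
  · rw [hunf]
    obtain ⟨hperm, hlen2, hins, hlt2, hunch, hpok⟩ := harg
    rw [hlen'] at hlen2 hlt2
    refine ⟨?_, hlen2, hins, hlt2, ?_, ?_⟩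
    · refine hperm.trans ?_
      have e1 : (h.set pos (h.getD ((pos - 1) / 2) 0)).set ((pos - 1) / 2) x
          = ((h.set pos x).set pos ((h.set pos x).getD ((pos - 1) / 2) 0)).set ((pos - 1) / 2) ((h.set pos x).getD pos 0) := by
        rw [hgpp, hgx, List.set_set]
      rw [e1]
      exact pvSet_swap_perm (h.set pos x) pos ((pos - 1) / 2) (by simp [hlen]) (by simp [hpplen])
    · intro j hj
      rw [hunch j hj]
      apply pvGetD_set_ne
      intro hc; subst hc; rw [hin] at hj; cases hj
    · intro c hc0 hcl hcs hcns
      exact hpok c hc0 (by rw [hlen']; exact hcl) hcs hcns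
  · -- hpairs for the recursive call at the parent position
    intro c hc0 hcl hcs hcns hcpp
    rw [hlen'] at hcl
    unfold POK
    by_cases hcp : c = pos
    · -- the pair ((pos-1)/2, pos)
      subst hcp
      rw [hgd_pos, hgd_pp]
      omega
    · by_cases hpar : (c - 1) / 2 = pos
      · -- c is a child of pos: grandparent compensation hgp
        rw [hpar, hgd_pos, hgd_other c hcpp hcp]
        have h1 := hgp (by omega) c hcl hpar
        rw [hgpp] at h1
        rw [hgother c hcp] at h1
        exact h1
      · by_cases hpar2 : (c - 1) / 2 = (pos - 1) / 2
        · -- c is a child of (pos-1)/2 other than pos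
          rw [hpar2, hgd_pp, hgd_other c hcpp hcp]
          have h1 := hpairs c hc0 hcl hcs hcns hcp
          unfold POK at h1
          rw [hpar2, hgpp, hgother c hcp] at h1
          omega
        · -- untouched pair
          rw [hgd_other _ hpar2 hpar, hgd_other c hcpp hcp]
          have h1 := hpairs c hc0 hcl hcs hcns hcp
          unfold POK at h1
          rw [hgother _ hpar, hgother c hcp] at h1
          exact h1
  · -- hgp for the recursive call
    intro hpps c hcl hcpar
    rw [hlen'] at hcl
    have hc0 : 0 < c := by omega
    have hcgt : (pos - 1) / 2 < c := by omega
    have h0pp : 0 < (pos - 1) / 2 := by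
      rcases Nat.lt_or_ge s ((pos - 1) / 2) with hh | hh
      · omega
      · exact absurd (le_antisymm hspp hh).symm hpps
    have hppplt : ((pos - 1) / 2 - 1) / 2 < (pos - 1) / 2 := by
      have := Nat.div_le_self ((pos - 1) / 2 - 1) 2; omega
    -- parent(pp) value ≤ value of pp in the original g
    have hpokpp := hpairs ((pos - 1) / 2) h0pp hpplen hinpp (by omega) (by omega)
    unfold POK at hpokpp
    rw [hgpp] at hpokpp
    have hgd_ppp : ((h.set pos (h.getD ((pos - 1) / 2) 0)).set ((pos - 1) / 2) x).getD (((pos - 1) / 2 - 1) / 2) 0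
        = (h.set pos x).getD (((pos - 1) / 2 - 1) / 2) 0 := by
      rw [hgd_other _ (by omega) (by omega), hgother _ (by omega)]
    by_cases hcpos : c = pos
    · subst hcpos
      rw [hgd_ppp, hgd_pos]
      exact hpokpp
    · -- c is the other child of (pos-1)/2... wait, c is a child of pp here
      have hcne : c ≠ (pos - 1) / 2 := by omega
      rw [hgd_ppp, hgd_other c hcne hcpos]
      have hinc : inSub s c = true := inSub_of_parent (by rw [hcpar]; exact hinpp) (by omega)
      have h2 := hpairs c hc0 hcl hinc (by omega) hcpos
      unfold POK at h2
      rw [hcpar, hgpp, hgother c hcpos] at h2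
      omega

theorem siftupLoop_spec (n : Nat) (h : List Int) (s pos : Nat) (x : Int)
    (hmeas : h.length - pos ≤ n)
    (hs : s ≤ pos) (hlen : pos < h.length) (hin : inSub s pos = true)
    (hpairs : ∀ c, 0 < c → c < h.length → inSub s c = true → c ≠ s → c ≠ pos →
        (c - 1) / 2 ≠ pos → POK (h.set pos x) c)
    (hgp : pos ≠ s → ∀ c, c < h.length → (c - 1) / 2 = pos →
        (h.set pos x).getD ((pos - 1) / 2) 0 ≤ (h.set pos x).getD c 0) :
    ((pySiftupLoop h pos h.length).1.set (pySiftupLoop h pos h.length).2 x).Perm (h.set pos x) ∧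
    (pySiftupLoop h pos h.length).1.length = h.length ∧
    inSub s (pySiftupLoop h pos h.length).2 = true ∧
    (pySiftupLoop h pos h.length).2 < h.length ∧
    (∀ j, inSub s j = false →
        ((pySiftupLoop h pos h.length).1.set (pySiftupLoop h pos h.length).2 x).getD j 0 = h.getD j 0) ∧
    (∀ c, 0 < c → c < h.length → inSub s c = true → c ≠ s → c ≠ (pySiftupLoop h pos h.length).2 →
        POK ((pySiftupLoop h pos h.length).1.set (pySiftupLoop h pos h.length).2 x) c) ∧
    h.length ≤ 2 * (pySiftupLoop h pos h.length).2 + 1 := by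
  induction n generalizing h pos with
  | zero => omega
  | succ n ih =>
  have hgx : (h.set pos x).getD pos 0 = x := pvGetD_set_self h pos x hlen
  have hgother : ∀ j, j ≠ pos → (h.set pos x).getD j 0 = h.getD j 0 := by
    intro j hj; exact pvGetD_set_ne h pos j x (fun hc => hj hc.symm)
  by_cases hcond : 2 * pos + 1 < h.length
  case neg =>
    rw [pySiftupLoop, if_neg hcond]
    refine ⟨List.Perm.refl _, by simp, hin, hlen, ?_, ?_, by omega⟩
    · intro j hj
      apply hgother
      intro hc; subst hc; rw [hin] at hj; cases hj
    · intro c hc0 hcl hcs hcns hcp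
      apply hpairs c hc0 hcl hcs hcns hcp
      intro hc; omega
  case pos =>
  -- the selected smaller child mc
  have key : ∃ mc, pySiftupLoop h pos h.length = pySiftupLoop (h.set pos (h.getD mc 0)) mc h.length ∧
      (mc - 1) / 2 = pos ∧ pos < mc ∧ mc < h.length ∧
      (∀ d, 0 < d → d < h.length → (d - 1) / 2 = pos → d ≠ mc → h.getD mc 0 ≤ h.getD d 0) := by
    by_cases hsel : 2 * pos + 2 < h.length ∧ ¬ (h.getD (2 * pos + 1) 0 < h.getD (2 * pos + 2) 0)
    · refine ⟨2 * pos + 2, ?_, by omega, by omega, hsel.1, ?_⟩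
      · rw [pySiftupLoop]; simp only [if_pos hcond, if_pos hsel]
      · intro d hd0 hdl hdpar hdne
        have hd : d = 2 * pos + 1 := by omega
        subst hd; exact not_lt.mp hsel.2
    · refine ⟨2 * pos + 1, ?_, by omega, by omega, hcond, ?_⟩
      · rw [pySiftupLoop]; simp only [if_pos hcond, if_neg hsel]
      · intro d hd0 hdl hdpar hdne
        have hd : d = 2 * pos + 2 := by omega
        subst hd
        rcases Decidable.not_and_iff_not_or_not.mp hsel with h1 | h2
        · omega
        · have := Decidable.not_not.mp h2; omega
  obtain ⟨mc, hunf, hmcpar, hmcgt, hmclen, hmc_min⟩ := key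
  have hlen' : (h.set pos (h.getD mc 0)).length = h.length := by simp
  have hgd_pos : ((h.set pos (h.getD mc 0)).set mc x).getD pos 0 = h.getD mc 0 := by
    rw [pvGetD_set_ne _ _ _ _ (by omega), pvGetD_set_self _ _ _ hlen]
  have hgd_mc : ((h.set pos (h.getD mc 0)).set mc x).getD mc 0 = x :=
    pvGetD_set_self _ _ _ (by rw [hlen']; exact hmclen)
  have hgd_other : ∀ j, j ≠ mc → j ≠ pos →
      ((h.set pos (h.getD mc 0)).set mc x).getD j 0 = h.getD j 0 := by
    intro j h1 h2
    rw [pvGetD_set_ne _ _ _ _ (fun hc => h1 hc.symm), pvGetD_set_ne _ _ _ _ (fun hc => h2 hc.symm)]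
  have hinmc : inSub s mc = true := inSub_of_parent (by rw [hmcpar]; exact hin) (by omega)
  have harg := ih (h.set pos (h.getD mc 0)) mc (by rw [hlen']; omega) (by omega)
      (by rw [hlen']; exact hmclen) hinmc ?_ ?_
  · rw [hunf]
    obtain ⟨hperm, hlen2, hins, hlt2, hunch, hpok, hleaf⟩ := harg
    rw [hlen'] at hperm hlen2 hins hlt2 hunch hpok hleaf
    refine ⟨?_, hlen2, hins, hlt2, ?_, ?_, hleaf⟩
    · refine hperm.trans ?_
      have e1 : (h.set pos (h.getD mc 0)).set mc x
          = ((h.set pos x).set pos ((h.set pos x).getD mc 0)).set mc ((h.set pos x).getD pos 0) := by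
        rw [hgother mc (by omega), hgx, List.set_set]
      rw [e1]
      exact pvSet_swap_perm (h.set pos x) pos mc (by simp [hlen]) (by simp [hmclen])
    · intro j hj
      rw [hunch j hj]
      apply pvGetD_set_ne
      intro hc; subst hc; rw [hin] at hj; cases hj
    · intro c hc0 hcl hcs hcns
      exact hpok c hc0 hcl hcs hcns
  · -- hpairs for the recursive call at mc
    intro c hc0 hcl hcs hcns hcmc hcparmc
    rw [hlen'] at hcl
    unfold POK
    by_cases hcp : c = pos
    · -- pair (parent(pos), pos): grandparent compensation
      subst hcp
      have hcns2 : c ≠ s := hcns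
      have hposs : c ≠ s := hcns
      rw [hgd_pos, hgd_other ((c - 1) / 2) (by omega) (by
        have := Nat.div_le_self (c - 1) 2; omega)]
      have h1 := hgp hposs mc hmclen hmcpar
      rw [hgother mc (by omega)] at h1
      rw [hgother ((c - 1) / 2) (by have := Nat.div_le_self (c - 1) 2; omega)] at h1
      exact h1
    · by_cases hpar : (c - 1) / 2 = pos
      · -- c is the sibling of mc
        rw [hpar, hgd_pos, hgd_other c hcmc hcp]
        exact hmc_min c hc0 hcl hpar hcmc
      · -- untouched pair
        rw [hgd_other _ (fun hc => hcparmc hc) (fun hc => hpar hc), hgd_other c hcmc hcp]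
        have h1 := hpairs c hc0 hcl hcs hcns hcp hpar
        unfold POK at h1
        rw [hgother _ hpar, hgother c hcp] at h1
        exact h1
  · -- hgp for the recursive call at mc
    intro _ c hcl hcpar
    rw [hlen'] at hcl
    have hcgt : mc < c := by omega
    rw [hmcpar, hgd_pos, hgd_other c (by omega) (by omega)]
    have hinc : inSub s c = true := inSub_of_parent (by rw [hcpar]; exact hinmc) (by omega)
    have h1 := hpairs c (by omega) hcl hinc (by have := le_of_inSub hin; omega) (by omega) (by omega)
    unfold POK at h1
    rw [hcpar, hgother mc (by omega), hgother c (by omega)] at h1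
    exact h1

theorem siftdown_spec (h : List Int) (s p : Nat)
    (hp : p < h.length) (hs : s ≤ p) (hin : inSub s p = true)
    (hpairs : ∀ c, 0 < c → c < h.length → inSub s c = true → c ≠ s → c ≠ p → POK h c)
    (hgp : p ≠ s → ∀ c, c < h.length → (c - 1) / 2 = p → h.getD ((p - 1) / 2) 0 ≤ h.getD c 0) :
    (pySiftdown h s p).Perm h ∧ (pySiftdown h s p).length = h.length ∧
    (∀ j, inSub s j = false → (pySiftdown h s p).getD j 0 = h.getD j 0) ∧
    (∀ c, 0 < c → c < h.length → inSub s c = true → c ≠ s → POK (pySiftdown h s p) c) := by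
  have hself : h.set p (h.getD p 0) = h := pvSet_getD_self h p hp
  have hspec := siftdownLoop_spec h s p (h.getD p 0) hs hp hin
      (by rw [hself]; intro c h1 h2 h3 h4 h5; exact hpairs c h1 h2 h3 h4 h5)
      (by rw [hself]; exact hgp)
  rw [hself] at hspec
  obtain ⟨h1, h2, h3, h4, h5, h6⟩ := hspec
  refine ⟨h1, ?_, h5, h6⟩
  show ((pySiftdownLoop h s p (h.getD p 0)).1.set (pySiftdownLoop h s p (h.getD p 0)).2 (h.getD p 0)).length = h.length
  simpa using h2

theorem siftup_spec (h : List Int) (s : Nat) (hs : s < h.length)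
    (hpairs : ∀ c, 0 < c → c < h.length → inSub s c = true → c ≠ s → (c - 1) / 2 ≠ s → POK h c) :
    (pySiftup h s).Perm h ∧ (pySiftup h s).length = h.length ∧
    (∀ j, inSub s j = false → (pySiftup h s).getD j 0 = h.getD j 0) ∧
    (∀ c, 0 < c → c < h.length → inSub s c = true → c ≠ s → POK (pySiftup h s) c) := by
  have hself : h.set s (h.getD s 0) = h := pvSet_getD_self h s hs
  have h1 := siftupLoop_spec h.length h s s (h.getD s 0) (by omega) (le_refl s) hs (inSub_self s)
      (by rw [hself]; intro c a b c' d e f; exact hpairs c a b c' d f)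
      (by intro hc; exact absurd rfl hc)
  rw [hself] at h1
  obtain ⟨hperm, hlen, hins, hlt, hunch, hpok, hleaf⟩ := h1
  have hdef : pySiftup h s = pySiftdown
      ((pySiftupLoop h s h.length).1.set (pySiftupLoop h s h.length).2 (h.getD s 0))
      s (pySiftupLoop h s h.length).2 := rfl
  have hmlen : ((pySiftupLoop h s h.length).1.set (pySiftupLoop h s h.length).2 (h.getD s 0)).length
      = h.length := by simpa using hlen
  have h2 := siftdown_spec
      ((pySiftupLoop h s h.length).1.set (pySiftupLoop h s h.length).2 (h.getD s 0))
      s (pySiftupLoop h s h.length).2 (by rw [hmlen]; exact hlt) (le_of_inSub hins) hins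
      (by intro c a b c' d e; exact hpok c a (by rw [hmlen] at b; exact b) c' d e)
      (by intro _ c hcl hcp
          rw [hmlen] at hcl
          omega)
  rw [hdef]
  obtain ⟨p1, p2, p3, p4⟩ := h2
  refine ⟨p1.trans hperm, by rw [p2, hmlen], ?_, ?_⟩
  · intro j hj
    rw [p3 j hj, hunch j hj]
  · intro c a b c' d
    exact p4 c a (by rw [hmlen]; exact b) c' d

theorem heappush_spec (h : List Int) (x : Int) (hh : IsHeap h) :
    (pyHeappush h x).Perm (x :: h) ∧ (pyHeappush h x).length = h.length + 1 ∧
    IsHeap (pyHeappush h x) := by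
  have hlen : (h ++ [x]).length = h.length + 1 := by simp
  have happ : ∀ j, j < h.length → (h ++ [x]).getD j 0 = h.getD j 0 := by
    intro j hj
    simp [List.getD_eq_getElem?_getD, List.getElem?_append_left hj]
  have hpdef : pyHeappush h x = pySiftdown (h ++ [x]) 0 h.length := rfl
  have hspec := siftdown_spec (h ++ [x]) 0 h.length (by omega) (by omega) (inSub_zero _)
      ?_ ?_
  · obtain ⟨p1, p2, p3, p4⟩ := hspec
    rw [hpdef]
    refine ⟨p1.trans (List.perm_append_singleton x h), by rw [p2, hlen], ?_⟩
    intro c hc0 hcl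
    exact p4 c hc0 (by rw [p2] at hcl; exact hcl) (inSub_zero _) (by omega)
  · intro c hc0 hcl hcs hcns hcp
    rw [hlen] at hcl
    have hcl2 : c < h.length := by omega
    have hpl : (c - 1) / 2 < h.length := by have := Nat.div_le_self (c - 1) 2; omega
    unfold POK
    rw [happ c hcl2, happ _ hpl]
    exact hh c hc0 hcl2
  · intro hps c hcl hcp
    rw [hlen] at hcl
    omega

theorem heappop_spec (h : List Int) (hne : h ≠ []) (hh : IsHeap h) :
    h.Perm ((pyHeappop h).1 :: (pyHeappop h).2) ∧ IsHeap (pyHeappop h).2 ∧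
    (∀ y ∈ h, (pyHeappop h).1 ≤ y) ∧ (pyHeappop h).2.length + 1 = h.length := by
  have hlast : h.getLast?.getD 0 = h.getLast hne := by
    rw [List.getLast?_eq_some_getLast hne]; rfl
  have hmin : ∀ y ∈ h, h.getD 0 0 ≤ y := by
    intro y hy
    obtain ⟨i, hi, hiy⟩ := List.mem_iff_getElem.mp hy
    have := pvRoot_min hh i hi
    rw [List.getD_eq_getElem h 0 hi, hiy] at this
    exact this
  by_cases hrest : h.dropLast.isEmpty
  · -- h is a singleton
    have hlen1 : h.length = 1 := by
      have he := List.isEmpty_iff.mp hrest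
      have h2 : h.dropLast.length = h.length - 1 := List.length_dropLast
      rw [he] at h2
      simp at h2
      have h3 : h.length ≠ 0 := fun hc => hne (List.length_eq_zero_iff.mp hc)
      omega
    obtain ⟨a, ha⟩ : ∃ a, h = [a] := by
      cases h with
      | nil => exact absurd rfl hne
      | cons a t =>
        cases t with
        | nil => exact ⟨a, rfl⟩
        | cons b t' => simp at hlen1
    subst ha
    have hdef : pyHeappop [a] = (a, []) := by
      simp [pyHeappop]
    rw [hdef]
    refine ⟨by simp, ?_, ?_, by simp⟩
    · intro c hc0 hcl; simp at hcl
    · intro y hy; simp at hy; subst hy; exact le_refl _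
  · -- general case
    obtain ⟨b, t, hrt⟩ : ∃ b t, h.dropLast = b :: t := by
      cases hdl : h.dropLast with
      | nil => rw [hdl] at hrest; simp at hrest
      | cons b t => exact ⟨b, t, rfl⟩
    have hlen2 : 2 ≤ h.length := by
      have h2 : h.dropLast.length = h.length - 1 := by simp
      rw [hrt] at h2
      simp at h2
      omega
    have hdef : pyHeappop h = (h.dropLast.getD 0 0,
        pySiftup (h.dropLast.set 0 (h.getLast?.getD 0)) 0) := by
      simp only [pyHeappop, hrest]
      simp [hrest]
    have hdropg : ∀ j, j < h.length - 1 → h.dropLast.getD j 0 = h.getD j 0 := by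
      intro j hj
      simp only [List.getD_eq_getElem?_getD, List.getElem?_dropLast]
      rw [if_pos hj]
    have hm : (h.dropLast.set 0 (h.getLast?.getD 0)).length = h.length - 1 := by simp
    have hmg : ∀ j, 0 < j → j < h.length - 1 →
        (h.dropLast.set 0 (h.getLast?.getD 0)).getD j 0 = h.getD j 0 := by
      intro j hj0 hj
      rw [pvGetD_set_ne _ _ _ _ (by omega), hdropg j hj]
    have hspec := siftup_spec (h.dropLast.set 0 (h.getLast?.getD 0)) 0 (by rw [hm]; omega) ?_
    · obtain ⟨p1, p2, p3, p4⟩ := hspec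
      rw [hdef]
      have hr1 : h.dropLast.getD 0 0 = h.getD 0 0 := hdropg 0 (by omega)
      refine ⟨?_, ?_, ?_, ?_⟩
      · -- permutation
        have e1 : h.dropLast.set 0 (h.getLast?.getD 0) = h.getLast?.getD 0 :: t := by
          rw [hrt]; rfl
        have e2 : h = (b :: t) ++ [h.getLast?.getD 0] := by
          rw [hlast, ← hrt, List.dropLast_concat_getLast hne]
        have e3 : h.dropLast.getD 0 0 = b := by rw [hrt]; rfl
        rw [e3]
        have s1 : h.Perm (b :: (h.getLast?.getD 0 :: t)) := by
          conv_lhs => rw [e2]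
          simpa using List.Perm.cons b (List.perm_append_singleton (h.getLast?.getD 0) t)
        have s2 : (b :: (h.getLast?.getD 0 :: t)).Perm
            (b :: pySiftup (h.dropLast.set 0 (h.getLast?.getD 0)) 0) := by
          rw [← e1]; exact List.Perm.cons b p1.symm
        exact s1.trans s2
      · -- heap
        intro c hc0 hcl
        exact p4 c hc0 (by rw [p2] at hcl; exact hcl) (inSub_zero _) (by omega)
      · intro y hy
        rw [hr1]
        exact hmin y hy
      · rw [p2, hm]; omega
    · intro c hc0 hcl hins hcs hcp
      rw [hm] at hcl
      have hpl : 0 < (c - 1) / 2 := Nat.pos_of_ne_zero hcp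
      have hpl2 : (c - 1) / 2 < h.length - 1 := by have := Nat.div_le_self (c - 1) 2; omega
      unfold POK
      rw [hmg c hc0 hcl, hmg _ hpl hpl2]
      have := hh c hc0 (by omega)
      unfold POK at this
      exact this

theorem heapify_aux (k : Nat) (h : List Int) (hk : 2 * k ≤ h.length)
    (hphi : ∀ c, 0 < c → c < h.length → k ≤ (c - 1) / 2 → POK h c) :
    ((List.range k).reverse.foldl (fun a i => pySiftup a i) h).Perm h ∧
    ((List.range k).reverse.foldl (fun a i => pySiftup a i) h).length = h.length ∧
    IsHeap ((List.range k).reverse.foldl (fun a i => pySiftup a i) h) := by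
  induction k generalizing h with
  | zero =>
    refine ⟨by simp, by simp, ?_⟩
    intro c hc0 hcl
    simp only [List.range_zero, List.reverse_nil, List.foldl_nil] at hcl ⊢
    exact hphi c hc0 hcl (by omega)
  | succ k ih =>
    have hstep : (List.range (k + 1)).reverse.foldl (fun a i => pySiftup a i) h
        = (List.range k).reverse.foldl (fun a i => pySiftup a i) (pySiftup h k) := by
      rw [List.range_succ, List.reverse_append]
      rfl
    have hkl : k < h.length := by omega
    have hspec := siftup_spec h k hkl ?_
    · obtain ⟨p1, p2, p3, p4⟩ := hspec
      have harg := ih (pySiftup h k) (by omega) ?_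
      · obtain ⟨q1, q2, q3⟩ := harg
        rw [hstep]
        exact ⟨q1.trans p1, by rw [q2, p2], q3⟩
      · -- Φ(k) holds for the new array
        intro c hc0 hcl hpar
        rw [p2] at hcl
        by_cases hcin : inSub k c = true
        · have hck : c ≠ k := by intro hc; omega
          exact p4 c hc0 hcl hcin hck
        · -- untouched pair
          have hpnot : inSub k ((c - 1) / 2) = false := by
            rcases Bool.eq_false_or_eq_true (inSub k ((c - 1) / 2)) with ht | hf
            · exfalso
              have hcc : inSub k c = true := inSub_of_parent ht (by
                have := le_of_inSub ht; omega)
              rw [hcc] at hcin; exact hcin rfl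
            · exact hf
          have hpk : (c - 1) / 2 ≠ k := by
            intro hc; rw [hc, inSub_self] at hpnot; cases hpnot
          have hgoal := hphi c hc0 hcl (by omega)
          unfold POK at hgoal ⊢
          rw [p3 c (by simpa using hcin), p3 _ hpnot]
          exact hgoal
    · -- precondition of siftup at k
      intro c hc0 hcl hcin hck hcpar
      apply hphi c hc0 hcl
      have h1 := le_of_inSub (inSub_parent hcin hck)
      omega

theorem heapify_spec (x : List Int) :
    (pyHeapify x).Perm x ∧ (pyHeapify x).length = x.length ∧ IsHeap (pyHeapify x) := by
  have := heapify_aux (x.length / 2) x (by omega) ?_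
  · exact this
  · intro c hc0 hcl hpar
    exfalso
    omega

theorem keys_erase_eq_filter (d : PySem.Dict Int Int) (k : Int) :
    (d.erase k).keys = d.keys.filter (fun x => !(x == k)) := by
  show ((d.items.filter (fun p => !(p.1 == k))).map (fun p => p.1))
      = (d.items.map (fun p => p.1)).filter (fun x => !(x == k))
  rw [List.filter_map]
  rfl

theorem keys_perm_cons_filter (keys : List Int) (num : Int)
    (hnd : keys.Nodup) (hmem : num ∈ keys) :
    keys.Perm (num :: keys.filter (fun x => !(x == num))) := by
  have h1 := List.perm_cons_erase hmem
  have h2 : keys.erase num = keys.filter (fun x => !(x == num)) := by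
    rw [List.Nodup.erase_eq_filter hnd num]
    rfl
  rw [h2] at h1
  exact h1

theorem loop_eq (fuel : Nat) (heap : List Int) (freq : PySem.Dict Int Int) (cnt : Int)
    (hperm : heap.Perm (freq.keys.map (fun k => -k)))
    (hheap : IsHeap heap) (hnd : freq.keys.Nodup) :
    loopA fuel heap freq cnt = loopB fuel freq cnt := by
  induction fuel generalizing heap freq cnt with
  | zero => rfl
  | succ fuel ih =>
  by_cases hempty : heap.isEmpty
  · -- heap and dict both empty
    have h1 : heap = [] := List.isEmpty_iff.mp hempty
    have hkeys : freq.keys = [] := by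
      have h2 := hperm.length_eq
      rw [h1] at h2
      simp at h2
      exact List.length_eq_zero_iff.mp h2.symm
    have hmax : PySem.List.max? freq.keys (fun k => k) = none :=
      (PySem.List.max?_eq_none_iff freq.keys _).mpr hkeys
    rw [loopA, loopB, hmax]
    simp [hempty]
  · have hne : heap ≠ [] := fun hc => hempty (by rw [hc]; rfl)
    have hkne : freq.keys ≠ [] := by
      intro hc
      apply hne
      have h2 := hperm.length_eq
      rw [hc] at h2
      simp at h2
      exact h2
    obtain ⟨num, hmax⟩ : ∃ num, PySem.List.max? freq.keys (fun k => k) = some num := by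
      cases hm : PySem.List.max? freq.keys (fun k => k) with
      | none => exact absurd ((PySem.List.max?_eq_none_iff freq.keys _).mp hm) hkne
      | some v => exact ⟨v, rfl⟩
    have hnummem : num ∈ freq.keys := PySem.List.max?_mem hmax
    have hnummax : ∀ y ∈ freq.keys, y ≤ num := by
      intro y hy
      exact PySem.List.max?_isMax hmax y hy
    obtain ⟨hpperm, hpheap, hpmin, hplen⟩ := heappop_spec heap hne hheap
    -- the popped element is -num
    have hr1 : (pyHeappop heap).1 = -num := by
      have hmem1 : (pyHeappop heap).1 ∈ heap := hpperm.symm.subset (List.mem_cons_self)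
      have hmem2 : (pyHeappop heap).1 ∈ freq.keys.map (fun k => -k) := hperm.subset hmem1
      obtain ⟨k0, hk0, hk0e⟩ := List.mem_map.mp hmem2
      have hle1 : -num ≤ (pyHeappop heap).1 := by
        have := hnummax k0 hk0
        omega
      have hle2 : (pyHeappop heap).1 ≤ -num := by
        apply hpmin
        apply hperm.symm.subset
        exact List.mem_map.mpr ⟨num, hnummem, rfl⟩
      omega
    -- the tail of the pop matches the erased key set
    have hkeys1 : (freq.erase num).keys = freq.keys.filter (fun x => !(x == num)) :=
      keys_erase_eq_filter freq num
    have hnd1 : (freq.erase num).keys.Nodup := by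
      rw [hkeys1]; exact hnd.filter _
    have hperm1 : (pyHeappop heap).2.Perm ((freq.erase num).keys.map (fun k => -k)) := by
      have s1 : freq.keys.Perm (num :: freq.keys.filter (fun x => !(x == num))) :=
        keys_perm_cons_filter freq.keys num hnd hnummem
      have s2 : (freq.keys.map (fun k => -k)).Perm
          (-num :: (freq.erase num).keys.map (fun k => -k)) := by
        rw [hkeys1]
        simpa using s1.map (fun k => -k)
      have s3 : ((pyHeappop heap).1 :: (pyHeappop heap).2).Perm
          (-num :: (freq.erase num).keys.map (fun k => -k)) :=
        (hpperm.symm.trans (hperm.trans s2))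
      rw [hr1] at s3
      exact s3.cons_inv
    -- unfold one step of both loops
    rw [loopA, loopB, hmax]
    simp only [hempty, Bool.false_eq_true, if_false, hr1, neg_neg]
    by_cases hone : freq.getD num 0 = 1
    · simp only [if_pos hone]
      by_cases hhalf : 0 < PySem.Int.floordiv num 2
      · simp only [if_pos hhalf]
        by_cases hcont : (freq.erase num).contains (PySem.Int.floordiv num 2)
        · simp only [hcont, if_true]
          apply ih
          · rw [PySem.Dict.keys_insert_of_contains _ _ hcont]
            exact hperm1
          · exact hpheap
          · rw [PySem.Dict.keys_insert_of_contains _ _ hcont]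
            exact hnd1
        · have hcontf : (freq.erase num).contains (PySem.Int.floordiv num 2) = false := by
            rcases Bool.eq_false_or_eq_true ((freq.erase num).contains (PySem.Int.floordiv num 2)) with ht | hf
            · exact absurd ht hcont
            · exact hf
          simp only [hcont, Bool.false_eq_true, if_false]
          have hgd0 : (freq.erase num).getD (PySem.Int.floordiv num 2) 0 = 0 :=
            PySem.Dict.getD_of_not_contains _ _ hcontf
          rw [hgd0, zero_add]
          apply ih
          · rw [PySem.Dict.keys_insert_of_not_contains _ _ hcontf]
            obtain ⟨q1, q2, q3⟩ := heappush_spec (pyHeappop heap).2 (-(PySem.Int.floordiv num 2)) hpheap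
            refine q1.trans ?_
            rw [List.map_append]
            refine ?_
            have : ((freq.erase num).keys.map (fun k => -k) ++ [-(PySem.Int.floordiv num 2)]).Perm
                (-(PySem.Int.floordiv num 2) :: (freq.erase num).keys.map (fun k => -k)) :=
              List.perm_append_singleton _ _
            exact (List.Perm.cons _ hperm1).trans this.symm
          · exact (heappush_spec (pyHeappop heap).2 (-(PySem.Int.floordiv num 2)) hpheap).2.2
          · rw [PySem.Dict.keys_insert_of_not_contains _ _ hcontf]
            rw [List.nodup_append]
            refine ⟨hnd1, by simp, ?_⟩
            intro a ha b hbmem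
            rw [List.mem_singleton] at hbmem
            subst hbmem
            intro heq
            subst heq
            have : (freq.erase num).contains (PySem.Int.floordiv num 2) = true :=
              (PySem.Dict.contains_iff_mem_keys _ _).mpr ha
            exact hcont this
      · simp only [if_neg hhalf]
        exact ih (pyHeappop heap).2 (freq.erase num) (cnt + 1) hperm1 hpheap hnd1
    · simp only [if_neg hone]
      exact ih (pyHeappop heap).2 (freq.erase num) cnt hperm1 hpheap hnd1

theorem main_eq (arr : List Int) : count_unique_numbers arr = count_unique_numbers_alt arr := by
  by_cases hemp : arr.isEmpty
  · have h0 : arr = [] := List.isEmpty_iff.mp hemp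
    subst h0
    rfl
  · rw [count_unique_numbers]
    simp only [hemp, Bool.false_eq_true, if_false]
    exact loop_eq (pvFuel arr) _ _ 0 (heapify_spec _).1 (heapify_spec _).2.2
      (PySem.Dict.nodup_keys_counter arr)

-- ===== VERDICT (by name: the statement is the Claim_ definition above) =====
theorem count_unique_numbers_spec : Claim_equal_count_unique_numbers := by
  intro arr _
  exact main_eq arr
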